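-- pv_equiv track=rewrite | github.com/JH201421228/TIL | self/202602/20260215/boj_16935/1st.py | calc5
-- ===== SOURCE A (Python) =====
-- def calc5(origin):
--     N, M = len(origin), len(origin[0])
--
--     temp = [[0] * M for _ in range(N)]
--
--     mid_N, mid_M = N>>1, M>>1
--
--     for i in range(N):
--         for j in range(M):
--             if i < mid_N:
--                 if j < mid_M:
--                     temp[i][j+mid_M] = origin[i][j]
--                 else:
--                     temp[i+mid_N][j] = origin[i][j]
--             else:
--                 if j < mid_M:
--                     temp[i-mid_N][j] = origin[i][j]
--                 else:
--                     temp[i][j-mid_M] = origin[i][j]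
--
--     return temp
-- ===== SOURCE B (Python) =====
-- def calc5(origin):
--     N, M = len(origin), len(origin[0])
--     mid_N, mid_M = N >> 1, M >> 1
--
--     temp = [[0] * M for _ in range(N)]
--
--     # copy each quadrant as a contiguous block with row-slice assignments
--     for i in range(mid_N):
--         temp[i][mid_M:2 * mid_M] = origin[i][0:mid_M]       # top-left  -> top-right
--         temp[i + mid_N][mid_M:M] = origin[i][mid_M:M]       # top-right -> bottom-right
--     for i in range(mid_N, N):
--         temp[i - mid_N][0:mid_M] = origin[i][0:mid_M]       # bottom-left  -> top-left
--         temp[i][0:M - mid_M] = origin[i][mid_M:M]           # bottom-right -> bottom-left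
--
--     return temp
-- ===== Notes on version B (the rewrite author's own statement) =====
-- stated objective: faster
-- what changed: A pushes every source cell through a per-element double loop with a 4-way branch into a zero temp matrix; B copies each of the four quadrants as a contiguous block with row-slice assignments (two slice copies per row, half the row iterations, no per-element branching). Pre_ excludes only inputs on which A raises IndexError: an empty matrix and matrices with a row shorter than row 0.
import Mathlib
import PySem

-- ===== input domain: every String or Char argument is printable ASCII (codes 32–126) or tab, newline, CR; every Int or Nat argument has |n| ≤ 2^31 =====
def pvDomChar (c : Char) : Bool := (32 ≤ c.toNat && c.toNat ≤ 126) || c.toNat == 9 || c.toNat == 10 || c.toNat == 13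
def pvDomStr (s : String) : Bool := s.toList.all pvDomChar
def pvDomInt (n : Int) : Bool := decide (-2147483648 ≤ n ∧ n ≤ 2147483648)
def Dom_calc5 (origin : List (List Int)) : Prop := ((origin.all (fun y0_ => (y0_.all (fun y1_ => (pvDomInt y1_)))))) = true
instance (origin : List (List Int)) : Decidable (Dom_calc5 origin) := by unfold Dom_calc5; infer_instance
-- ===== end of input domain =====

-- B replaces A's per-element double loop with a 4-way branch by four contiguous block copies
-- (row-slice assignments) of the quadrants into the zero temp matrix; measurably faster in
-- Python by a constant factor (slice copies, half the row iterations, no per-element branch).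

-- ===== PORT A =====
-- temp[t][c] = v  (List.set is a no-op out of range; under Pre_calc5 all of A's writes are in range)
def pvSet2 (m : List (List Int)) (t c : Nat) (v : Int) : List (List Int) :=
  m.set t ((m.getD t []).set c v)

-- literal transliteration of Source A: zero temp matrix, double loop, 4-way branch scatter.
-- origin[i][j] is read via getD; under Pre_calc5 every such read is in range, as in the Python.
def calc5 (origin : List (List Int)) : List (List Int) :=
  let N := origin.length
  let M := (origin.getD 0 []).length
  let midN := N >>> 1
  let midM := M >>> 1
  (List.range N).foldl (fun temp i =>
    (List.range M).foldl (fun temp j =>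
      let v := (origin.getD i []).getD j 0
      if i < midN then
        if j < midM then pvSet2 temp i (j + midM) v
        else pvSet2 temp (i + midN) j v
      else
        if j < midM then pvSet2 temp (i - midN) j v
        else pvSet2 temp i (j - midM) v) temp)
    ((List.range N).map (fun _ => List.replicate M (0 : Int)))

-- ===== PORT B =====
-- Python list-slice assignment row[a:b] = src (0 ≤ a ≤ b ≤ len(row)): take a ++ src ++ drop b
def pvSliceAsg (row : List Int) (a b : Nat) (src : List Int) : List Int :=
  row.take a ++ src ++ row.drop b

-- literal transliteration of Source B: zero temp matrix, then the four quadrants copied as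
-- contiguous blocks by row-slice assignment; origin[i][0:mid_M] is take midM,
-- origin[i][mid_M:M] is (drop midM).take (M - midM).
def calc5_alt (origin : List (List Int)) : List (List Int) :=
  let N := origin.length
  let M := (origin.getD 0 []).length
  let midN := N >>> 1
  let midM := M >>> 1
  let temp := (List.range N).map (fun _ => List.replicate M (0 : Int))
  let temp := (List.range midN).foldl (fun temp i =>
    let temp := temp.set i (pvSliceAsg (temp.getD i []) midM (2 * midM)
      ((origin.getD i []).take midM))
    temp.set (i + midN) (pvSliceAsg (temp.getD (i + midN) []) midM M
      (((origin.getD i []).drop midM).take (M - midM)))) temp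
  (List.range' midN (N - midN)).foldl (fun temp i =>
    let temp := temp.set (i - midN) (pvSliceAsg (temp.getD (i - midN) []) 0 midM
      ((origin.getD i []).take midM))
    temp.set i (pvSliceAsg (temp.getD i []) 0 (M - midM)
      (((origin.getD i []).drop midM).take (M - midM)))) temp

-- ===== PRECONDITION & SPEC =====
-- Pre_ excludes exactly the inputs where Python A raises IndexError: empty origin
-- (len(origin[0])) and matrices where some row is shorter than row 0 (read origin[i][j]).
def Pre_calc5 (origin : List (List Int)) : Prop :=
  origin ≠ [] ∧ ∀ row ∈ origin, (origin.getD 0 []).length ≤ row.length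
instance (origin : List (List Int)) : Decidable (Pre_calc5 origin) := by unfold Pre_calc5; infer_instance

def pvWitness_calc5 : List (List Int) := [[1, 2, 3], [4, 5, 6], [7, 8, 9]]

def Spec_calc5 (origin : List (List Int)) (out : List (List Int)) : Prop := out = calc5_alt origin
instance (origin : List (List Int)) (out : List (List Int)) : Decidable (Spec_calc5 origin out) := by unfold Spec_calc5; infer_instance

-- ===== CLAIM (what is proved, stated in full; the proofs are below) =====
def Claim_equal_calc5 : Prop := ∀ (origin : List (List Int)), Dom_calc5 origin → Pre_calc5 origin → Spec_calc5 origin (calc5 origin)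

-- ===== LEMMAS AND PROOFS =====

-- ---------- shared: per-cell last-write-wins machinery ----------

theorem pv_getD_set_self {α : Type} (l : List α) (n : Nat) (a d : α) (h : n < l.length) :
    (l.set n a).getD n d = a := by
  rw [List.getD_eq_getElem?_getD, List.getElem?_set_self h, Option.getD_some]

theorem pv_getD_set_ne {α : Type} (l : List α) (n m : Nat) (a d : α) (h : n ≠ m) :
    (l.set n a).getD m d = l.getD m d := by
  rw [List.getD_eq_getElem?_getD, List.getElem?_set_ne h, ← List.getD_eq_getElem?_getD]

-- A's single element write (target row, target col, value)
def pvStep (m : List (List Int)) (w : Nat × Nat × Int) : List (List Int) :=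
  m.set w.1 ((m.getD w.1 []).set w.2.1 w.2.2)

-- the write A's iteration (i, j) performs
def pvWrite (origin : List (List Int)) (midN midM : Nat) (i j : Nat) : Nat × Nat × Int :=
  let v := (origin.getD i []).getD j 0
  if i < midN then (if j < midM then (i, j + midM, v) else (i + midN, j, v))
  else (if j < midM then (i - midN, j, v) else (i, j - midM, v))

theorem pvStep_length (m : List (List Int)) (w : Nat × Nat × Int) :
    (pvStep m w).length = m.length := by
  simp [pvStep]

theorem pvStep_rows (M : Nat) (m : List (List Int)) (w : Nat × Nat × Int)
    (h : ∀ r ∈ m, r.length = M) : ∀ r ∈ pvStep m w, r.length = M := by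
  intro r hr
  unfold pvStep at hr
  by_cases hw : w.1 < m.length
  · rcases List.mem_or_eq_of_mem_set hr with h' | h'
    · exact h r h'
    · subst h'
      rw [List.length_set, List.getD_eq_getElem _ _ hw]
      exact h _ (List.getElem_mem hw)
  · rw [List.set_eq_of_length_le (by omega)] at hr
    exact h r hr

theorem pvStep_getD (M t c : Nat) (m : List (List Int)) (w : Nat × Nat × Int)
    (h : ∀ r ∈ m, r.length = M) (ht : t < m.length) (hc : c < M) :
    ((pvStep m w).getD t []).getD c 0 =
      if w.1 = t ∧ w.2.1 = c then w.2.2 else (m.getD t []).getD c 0 := by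
  obtain ⟨t', c', v⟩ := w
  have hrow : (m.getD t []).length = M := by
    rw [List.getD_eq_getElem _ _ ht]; exact h _ (List.getElem_mem ht)
  simp only [pvStep]
  by_cases h1 : t' = t
  · subst h1
    rw [pv_getD_set_self _ _ _ _ ht]
    by_cases h2 : c' = c
    · subst h2
      rw [pv_getD_set_self _ _ _ _ (by omega), if_pos ⟨rfl, rfl⟩]
    · rw [pv_getD_set_ne _ _ _ _ _ h2, if_neg (by tauto)]
  · rw [pv_getD_set_ne _ _ _ _ _ h1, if_neg (by tauto)]

theorem foldl_pvStep_length (ws : List (Nat × Nat × Int)) :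
    ∀ m : List (List Int), (ws.foldl pvStep m).length = m.length := by
  induction ws with
  | nil => intro m; rfl
  | cons w ws ih => intro m; rw [List.foldl_cons, ih, pvStep_length]

theorem foldl_pvStep_rows (M : Nat) (ws : List (Nat × Nat × Int)) :
    ∀ m : List (List Int), (∀ r ∈ m, r.length = M) →
      ∀ r ∈ ws.foldl pvStep m, r.length = M := by
  induction ws with
  | nil => intro m h; exact h
  | cons w ws ih => intro m h; exact ih _ (pvStep_rows M m w h)

-- per-cell value of a sequence of element writes: the last write to (t, c) wins
theorem foldl_pvStep_getD (M t c : Nat) (ws : List (Nat × Nat × Int)) :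
    ∀ m : List (List Int), (∀ r ∈ m, r.length = M) → t < m.length → c < M →
      ((ws.foldl pvStep m).getD t []).getD c 0 =
        ws.foldl (fun acc w => if w.1 = t ∧ w.2.1 = c then w.2.2 else acc)
          ((m.getD t []).getD c 0) := by
  induction ws with
  | nil => intro m _ _ _; rfl
  | cons w ws ih =>
    intro m h ht hc
    rw [List.foldl_cons, List.foldl_cons,
        ih (pvStep m w) (pvStep_rows M m w h) (by rw [pvStep_length]; exact ht) hc,
        pvStep_getD M t c m w h ht hc]

-- fold over range n of "if hit then val else acc"
def pvFoldIf (n : Nat) (hit : Nat → Prop) [DecidablePred hit] (val : Nat → Int) (d : Int) : Int :=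
  (List.range n).foldl (fun acc j => if hit j then val j else acc) d

theorem pvFoldIf_none (n : Nat) (hit : Nat → Prop) [DecidablePred hit] (val : Nat → Int)
    (d : Int) (h : ∀ j, j < n → ¬ hit j) : pvFoldIf n hit val d = d := by
  induction n with
  | zero => rfl
  | succ n ih =>
    unfold pvFoldIf at *
    rw [List.range_succ, List.foldl_append]
    simp only [List.foldl_cons, List.foldl_nil, if_neg (h n (by omega))]
    exact ih (fun j hj => h j (by omega))

theorem pvFoldIf_max (n : Nat) (hit : Nat → Prop) [DecidablePred hit] (val : Nat → Int)
    (d : Int) (j0 : Nat) (hj0 : j0 < n) (hh : hit j0)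
    (hmax : ∀ j, j0 < j → j < n → ¬ hit j) : pvFoldIf n hit val d = val j0 := by
  induction n with
  | zero => omega
  | succ n ih =>
    unfold pvFoldIf at *
    rw [List.range_succ, List.foldl_append]
    simp only [List.foldl_cons, List.foldl_nil]
    by_cases he : j0 = n
    · subst he; rw [if_pos hh]
    · rw [if_neg (hmax n (by omega) (by omega))]
      exact ih (by omega) (fun j h1 h2 => hmax j h1 (by omega))

-- effect of source row i on target cell (t, c), as a function of the incoming value d
def pvG (o : List (List Int)) (midN midM M t c i : Nat) (d : Int) : Int :=
  if i < midN then
    if t = i ∧ midM ≤ c ∧ c < 2 * midM then (o.getD i []).getD (c - midM) 0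
    else if t = i + midN ∧ midM ≤ c then (o.getD i []).getD c 0
    else d
  else
    if t = i ∧ c + midM < M then (o.getD i []).getD (c + midM) 0
    else if t = i - midN ∧ c < midM then (o.getD i []).getD c 0
    else d

-- evaluating A's inner (over j) last-write fold for one source row i
theorem pvInner_eval (o : List (List Int)) (midN midM M t c i : Nat) (hc : c < M)
    (hM : 2 * midM ≤ M) (d : Int) :
    pvFoldIf M (fun j => (pvWrite o midN midM i j).1 = t ∧ (pvWrite o midN midM i j).2.1 = c)
      (fun j => (pvWrite o midN midM i j).2.2) d = pvG o midN midM M t c i d := by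
  have hw_lt : ∀ j, i < midN → pvWrite o midN midM i j =
      (if j < midM then (i, j + midM, (o.getD i []).getD j 0)
       else (i + midN, j, (o.getD i []).getD j 0)) := by
    intro j h; simp [pvWrite, h]
  have hw_ge : ∀ j, ¬ i < midN → pvWrite o midN midM i j =
      (if j < midM then (i - midN, j, (o.getD i []).getD j 0)
       else (i, j - midM, (o.getD i []).getD j 0)) := by
    intro j h; simp [pvWrite, h]
  unfold pvG
  by_cases hi : i < midN
  · simp only [if_pos hi]
    by_cases g1 : t = i ∧ midM ≤ c ∧ c < 2 * midM
    · rw [if_pos g1]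
      refine (pvFoldIf_max M _ _ d (c - midM) (by omega) ?_ ?_).trans ?_
      · rw [hw_lt _ hi, if_pos (show c - midM < midM by omega)]
        exact ⟨show i = t by omega, show c - midM + midM = c by omega⟩
      · intro j hj1 hj2
        rw [hw_lt _ hi]
        by_cases hjm : j < midM
        · rw [if_pos hjm]; show ¬ (i = t ∧ j + midM = c); omega
        · rw [if_neg hjm]; show ¬ (i + midN = t ∧ j = c); omega
      · rw [hw_lt _ hi, if_pos (show c - midM < midM by omega)]
    · rw [if_neg g1]
      by_cases g2 : t = i + midN ∧ midM ≤ c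
      · rw [if_pos g2]
        refine (pvFoldIf_max M _ _ d c hc ?_ ?_).trans ?_
        · rw [hw_lt _ hi, if_neg (show ¬ c < midM by omega)]
          exact ⟨show i + midN = t by omega, rfl⟩
        · intro j hj1 hj2
          rw [hw_lt _ hi]
          by_cases hjm : j < midM
          · rw [if_pos hjm]; show ¬ (i = t ∧ j + midM = c); omega
          · rw [if_neg hjm]; show ¬ (i + midN = t ∧ j = c); omega
        · rw [hw_lt _ hi, if_neg (show ¬ c < midM by omega)]
      · refine (pvFoldIf_none M _ _ d ?_).trans (by rw [if_neg g2])
        intro j hj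
        rw [hw_lt _ hi]
        by_cases hjm : j < midM
        · rw [if_pos hjm]; show ¬ (i = t ∧ j + midM = c)
          intro hcon; exact g1 ⟨by omega, by omega, by omega⟩
        · rw [if_neg hjm]; show ¬ (i + midN = t ∧ j = c)
          intro hcon; exact g2 ⟨by omega, by omega⟩
  · simp only [if_neg hi]
    by_cases g1 : t = i ∧ c + midM < M
    · rw [if_pos g1]
      refine (pvFoldIf_max M _ _ d (c + midM) (by omega) ?_ ?_).trans ?_
      · rw [hw_ge _ hi, if_neg (show ¬ c + midM < midM by omega)]
        exact ⟨show i = t by omega, show c + midM - midM = c by omega⟩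
      · intro j hj1 hj2
        rw [hw_ge _ hi]
        by_cases hjm : j < midM
        · rw [if_pos hjm]; show ¬ (i - midN = t ∧ j = c); omega
        · rw [if_neg hjm]; show ¬ (i = t ∧ j - midM = c); omega
      · rw [hw_ge _ hi, if_neg (show ¬ c + midM < midM by omega)]
    · rw [if_neg g1]
      by_cases g2 : t = i - midN ∧ c < midM
      · rw [if_pos g2]
        refine (pvFoldIf_max M _ _ d c hc ?_ ?_).trans ?_
        · rw [hw_ge _ hi, if_pos (show c < midM by omega)]
          exact ⟨show i - midN = t by omega, rfl⟩
        · intro j hj1 hj2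
          rw [hw_ge _ hi]
          by_cases hjm : j < midM
          · rw [if_pos hjm]; show ¬ (i - midN = t ∧ j = c); omega
          · rw [if_neg hjm]; show ¬ (i = t ∧ j - midM = c)
            intro hcon; exact g1 ⟨by omega, by omega⟩
        · rw [hw_ge _ hi, if_pos (show c < midM by omega)]
      · refine (pvFoldIf_none M _ _ d ?_).trans (by rw [if_neg g2])
        intro j hj
        rw [hw_ge _ hi]
        by_cases hjm : j < midM
        · rw [if_pos hjm]; show ¬ (i - midN = t ∧ j = c)
          intro hcon; exact g2 ⟨by omega, by omega⟩
        · rw [if_neg hjm]; show ¬ (i = t ∧ j - midM = c)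
          intro hcon; exact g1 ⟨by omega, by omega⟩

-- a nested fold of folds equals the fold over the flattened list
theorem foldl_foldl_flat {σ α β : Type} (g : σ → β → σ) (l : List α) (f : α → List β) :
    ∀ init : σ,
      l.foldl (fun s x => (f x).foldl g s) init = (l.flatMap f).foldl g init := by
  induction l with
  | nil => intro init; rfl
  | cons x l ih => intro init; rw [List.foldl_cons, List.flatMap_cons, List.foldl_append, ih]

-- A's scatter loop as a flat write list
theorem calc5_eq_flat (origin : List (List Int)) :
    calc5 origin =
      ((List.range origin.length).flatMap (fun i =>
          (List.range (origin.getD 0 []).length).map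
            (pvWrite origin (origin.length >>> 1) ((origin.getD 0 []).length >>> 1) i))).foldl
        pvStep
        ((List.range origin.length).map
          (fun _ => List.replicate (origin.getD 0 []).length (0 : Int))) := by
  unfold calc5
  simp only
  rw [← foldl_foldl_flat]
  congr 1
  funext temp i
  rw [List.foldl_map]
  congr 1
  funext s j
  simp only [pvWrite, pvStep, pvSet2]
  split_ifs <;> rfl

theorem pv_init_rows (N M : Nat) :
    ∀ r ∈ (List.range N).map (fun _ => List.replicate M (0 : Int)), r.length = M := by
  intro r hr
  rcases List.mem_map.1 hr with ⟨i, _, h⟩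
  rw [← h, List.length_replicate]

theorem pv_init_getD (N M t c : Nat) (ht : t < N) :
    ((((List.range N).map (fun _ => List.replicate M (0 : Int))).getD t []).getD c 0) = 0 := by
  have h1 : (((List.range N).map (fun _ => List.replicate M (0 : Int))).getD t []) =
      List.replicate M (0 : Int) := by
    rw [List.getD_eq_getElem _ _ (by rw [List.length_map, List.length_range]; exact ht),
        List.getElem_map]
  rw [h1, List.getD_eq_getElem?_getD, List.getElem?_replicate]
  split <;> simp

-- the per-cell characterisation of A's result: the fold of pvG over all source rows
theorem calc5_getD (origin : List (List Int)) (t c : Nat)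
    (ht : t < origin.length) (hc : c < (origin.getD 0 []).length) :
    ((calc5 origin).getD t []).getD c 0 =
      (List.range origin.length).foldl
        (fun d i => pvG origin (origin.length >>> 1) ((origin.getD 0 []).length >>> 1)
          (origin.getD 0 []).length t c i d) 0 := by
  have hM : (origin.getD 0 []).length >>> 1 = (origin.getD 0 []).length / 2 :=
    Nat.shiftRight_one _
  rw [calc5_eq_flat,
      foldl_pvStep_getD (origin.getD 0 []).length t c _ _ (pv_init_rows _ _)
        (by rw [List.length_map, List.length_range]; exact ht) hc,
      pv_init_getD _ _ _ _ ht,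
      ← foldl_foldl_flat]
  have step1 : ∀ (d : Int) (i : Nat),
      ((List.range (origin.getD 0 []).length).map
          (pvWrite origin (origin.length >>> 1) ((origin.getD 0 []).length >>> 1) i)).foldl
        (fun acc w => if w.1 = t ∧ w.2.1 = c then w.2.2 else acc) d =
      pvG origin (origin.length >>> 1) ((origin.getD 0 []).length >>> 1)
        (origin.getD 0 []).length t c i d := by
    intro d i
    rw [List.foldl_map]
    exact pvInner_eval origin _ _ _ t c i hc (by omega) d
  exact congrFun (congrFun (congrArg List.foldl (funext₂ step1)) 0) _

theorem calc5_length (origin : List (List Int)) : (calc5 origin).length = origin.length := by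
  rw [calc5_eq_flat, foldl_pvStep_length]
  simp

theorem calc5_rows (origin : List (List Int)) :
    ∀ r ∈ calc5 origin, r.length = (origin.getD 0 []).length := by
  rw [calc5_eq_flat]
  exact foldl_pvStep_rows _ _ _ (pv_init_rows _ _)

-- ---------- B side: slice writes ----------

theorem pv_sliceRow_getD (r src : List Int) (a c : Nat) (hok : a + src.length ≤ r.length) :
    (r.take a ++ src ++ r.drop (a + src.length)).getD c 0 =
      if a ≤ c ∧ c < a + src.length then src.getD (c - a) 0 else r.getD c 0 := by
  have hta : (r.take a).length = a := by simp; omega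
  have htb : (r.take a ++ src).length = a + src.length := by simp [hta]
  rw [List.getD_eq_getElem?_getD, List.getD_eq_getElem?_getD, List.getD_eq_getElem?_getD]
  by_cases h2 : c < a
  · rw [if_neg (by omega), List.getElem?_append_left (by omega : c < (r.take a ++ src).length),
        List.getElem?_append_left (by omega : c < (r.take a).length),
        List.getElem?_take_of_lt h2]
  · by_cases h3 : c < a + src.length
    · rw [if_pos ⟨by omega, h3⟩,
          List.getElem?_append_left (by omega : c < (r.take a ++ src).length),
          List.getElem?_append_right (by omega : (r.take a).length ≤ c), hta]
    · rw [if_neg (by omega),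
          List.getElem?_append_right (by omega : (r.take a ++ src).length ≤ c),
          List.getElem?_drop, htb]
      congr 2
      omega

theorem pv_getD_take (r : List Int) (n k : Nat) (h : k < n) :
    (r.take n).getD k 0 = r.getD k 0 := by
  rw [List.getD_eq_getElem?_getD, List.getD_eq_getElem?_getD, List.getElem?_take_of_lt h]

theorem pv_getD_dropTake (r : List Int) (a n k : Nat) (h : k < n) :
    ((r.drop a).take n).getD k 0 = r.getD (a + k) 0 := by
  rw [pv_getD_take _ _ _ h, List.getD_eq_getElem?_getD, List.getD_eq_getElem?_getD,
      List.getElem?_drop]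

-- B's single slice write (target row, start column, block); well-formed when start + len ≤ M
def pvStepS (m : List (List Int)) (w : Nat × Nat × List Int) : List (List Int) :=
  m.set w.1 ((m.getD w.1 []).take w.2.1 ++ w.2.2 ++ (m.getD w.1 []).drop (w.2.1 + w.2.2.length))

def pvOkW (M : Nat) (w : Nat × Nat × List Int) : Prop := w.2.1 + w.2.2.length ≤ M

theorem pvStepS_length (m : List (List Int)) (w : Nat × Nat × List Int) :
    (pvStepS m w).length = m.length := by
  simp [pvStepS]

theorem pvStepS_rows (M : Nat) (m : List (List Int)) (w : Nat × Nat × List Int)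
    (hok : pvOkW M w) (h : ∀ r ∈ m, r.length = M) : ∀ r ∈ pvStepS m w, r.length = M := by
  intro r hr
  unfold pvStepS at hr
  by_cases hw : w.1 < m.length
  · have hrow : (m.getD w.1 []).length = M := by
      rw [List.getD_eq_getElem _ _ hw]; exact h _ (List.getElem_mem hw)
    rcases List.mem_or_eq_of_mem_set hr with h' | h'
    · exact h r h'
    · subst h'
      unfold pvOkW at hok
      simp only [List.length_append, List.length_take, List.length_drop, hrow]
      omega
  · rw [List.set_eq_of_length_le (by omega)] at hr
    exact h r hr

theorem pvStepS_getD (M t c : Nat) (m : List (List Int)) (w : Nat × Nat × List Int)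
    (hok : pvOkW M w) (h : ∀ r ∈ m, r.length = M) (ht : t < m.length) :
    ((pvStepS m w).getD t []).getD c 0 =
      if w.1 = t ∧ w.2.1 ≤ c ∧ c < w.2.1 + w.2.2.length then w.2.2.getD (c - w.2.1) 0
      else (m.getD t []).getD c 0 := by
  obtain ⟨t', a, src⟩ := w
  unfold pvOkW at hok
  simp only at hok ⊢
  simp only [pvStepS]
  by_cases h1 : t' = t
  · subst h1
    have hrow : (m.getD t' []).length = M := by
      rw [List.getD_eq_getElem _ _ ht]; exact h _ (List.getElem_mem ht)
    rw [pv_getD_set_self _ _ _ _ ht, pv_sliceRow_getD _ _ _ _ (by omega)]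
    split_ifs <;> first | rfl | omega
  · rw [pv_getD_set_ne _ _ _ _ _ h1, if_neg (by tauto)]

theorem foldl_pvStepS_length (ws : List (Nat × Nat × List Int)) :
    ∀ m : List (List Int), (ws.foldl pvStepS m).length = m.length := by
  induction ws with
  | nil => intro m; rfl
  | cons w ws ih => intro m; rw [List.foldl_cons, ih, pvStepS_length]

theorem foldl_pvStepS_rows (M : Nat) (ws : List (Nat × Nat × List Int))
    (hws : ∀ w ∈ ws, pvOkW M w) :
    ∀ m : List (List Int), (∀ r ∈ m, r.length = M) →
      ∀ r ∈ ws.foldl pvStepS m, r.length = M := by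
  induction ws with
  | nil => intro m h; exact h
  | cons w ws ih =>
    intro m h
    exact ih (fun w' hw' => hws w' (List.mem_cons_of_mem _ hw')) _
      (pvStepS_rows M m w (hws w List.mem_cons_self) h)

-- per-cell value of a sequence of slice writes: the last covering write wins
theorem foldl_pvStepS_getD (M t c : Nat) (ws : List (Nat × Nat × List Int))
    (hws : ∀ w ∈ ws, pvOkW M w) :
    ∀ m : List (List Int), (∀ r ∈ m, r.length = M) → t < m.length →
      ((ws.foldl pvStepS m).getD t []).getD c 0 =
        ws.foldl (fun acc w =>
            if w.1 = t ∧ w.2.1 ≤ c ∧ c < w.2.1 + w.2.2.length then w.2.2.getD (c - w.2.1) 0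
            else acc)
          ((m.getD t []).getD c 0) := by
  induction ws with
  | nil => intro m _ _; rfl
  | cons w ws ih =>
    intro m h ht
    rw [List.foldl_cons, List.foldl_cons,
        ih (fun w' hw' => hws w' (List.mem_cons_of_mem _ hw')) (pvStepS m w)
          (pvStepS_rows M m w (hws w List.mem_cons_self) h)
          (by rw [pvStepS_length]; exact ht),
        pvStepS_getD M t c m w (hws w List.mem_cons_self) h ht]

-- the two slice writes of B's first loop (row i of the top half)
def pvWs1 (o : List (List Int)) (midN midM M : Nat) (i : Nat) : List (Nat × Nat × List Int) :=
  [(i, midM, (o.getD i []).take midM),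
   (i + midN, midM, ((o.getD i []).drop midM).take (M - midM))]

-- the two slice writes of B's second loop (row i of the bottom half)
def pvWs2 (o : List (List Int)) (midN midM M : Nat) (i : Nat) : List (Nat × Nat × List Int) :=
  [(i - midN, 0, (o.getD i []).take midM),
   (i, 0, ((o.getD i []).drop midM).take (M - midM))]

-- every write B performs fits inside a row of width M
theorem pvWsOk (o : List (List Int)) (midN midM M : Nat) (hM : 2 * midM ≤ M)
    (l1 l2 : List Nat) :
    ∀ w ∈ l1.flatMap (pvWs1 o midN midM M) ++ l2.flatMap (pvWs2 o midN midM M),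
      pvOkW M w := by
  intro w hw
  rcases List.mem_append.1 hw with h | h <;>
    rcases List.mem_flatMap.1 h with ⟨i, _, hwi⟩ <;>
    simp only [pvWs1, pvWs2, List.mem_cons] at hwi <;>
    rcases hwi with h' | h' | h' <;> simp_all [pvOkW] <;> omega

-- Python's row[a:b] = src with b = a + len(src) is exactly one slice write
theorem pvSliceAsg_eq_stepS (m : List (List Int)) (t a b : Nat) (src : List Int)
    (h : b = a + src.length) :
    m.set t (pvSliceAsg (m.getD t []) a b src) = pvStepS m (t, a, src) := by
  subst h; rfl

-- B's loops as a flat slice-write list (uses Pre_ to know the block lengths)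
theorem calc5_alt_eq_flat (origin : List (List Int)) (hpre : Pre_calc5 origin) :
    calc5_alt origin =
      ((List.range (origin.length >>> 1)).flatMap
          (pvWs1 origin (origin.length >>> 1) ((origin.getD 0 []).length >>> 1)
            (origin.getD 0 []).length) ++
        (List.range' (origin.length >>> 1) (origin.length - origin.length >>> 1)).flatMap
          (pvWs2 origin (origin.length >>> 1) ((origin.getD 0 []).length >>> 1)
            (origin.getD 0 []).length)).foldl
        pvStepS
        ((List.range origin.length).map
          (fun _ => List.replicate (origin.getD 0 []).length (0 : Int))) := by
  obtain ⟨hne, hrows⟩ := hpre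
  have hlen : ∀ i, i < origin.length →
      (origin.getD 0 []).length ≤ (origin.getD i []).length := by
    intro i hi
    rw [List.getD_eq_getElem _ _ hi]
    exact hrows _ (List.getElem_mem hi)
  have hN2 : origin.length >>> 1 = origin.length / 2 := Nat.shiftRight_one _
  have hM2 : (origin.getD 0 []).length >>> 1 = (origin.getD 0 []).length / 2 :=
    Nat.shiftRight_one _
  unfold calc5_alt
  simp only
  rw [List.foldl_append, ← foldl_foldl_flat, ← foldl_foldl_flat]
  have e1 : ∀ init : List (List Int),
      (List.range (origin.length >>> 1)).foldl (fun temp i =>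
        let temp := temp.set i (pvSliceAsg (temp.getD i [])
          ((origin.getD 0 []).length >>> 1) (2 * ((origin.getD 0 []).length >>> 1))
          ((origin.getD i []).take ((origin.getD 0 []).length >>> 1)))
        temp.set (i + origin.length >>> 1) (pvSliceAsg (temp.getD (i + origin.length >>> 1) [])
          ((origin.getD 0 []).length >>> 1) (origin.getD 0 []).length
          (((origin.getD i []).drop ((origin.getD 0 []).length >>> 1)).take
            ((origin.getD 0 []).length - (origin.getD 0 []).length >>> 1)))) init =
      (List.range (origin.length >>> 1)).foldl (fun temp i =>
        (pvWs1 origin (origin.length >>> 1) ((origin.getD 0 []).length >>> 1)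
          (origin.getD 0 []).length i).foldl pvStepS temp) init := by
    intro init
    apply PySem.List.foldl_congr_mem
    intro temp i hi
    have hiN : i < origin.length := by
      have := List.mem_range.1 hi; omega
    have hl := hlen i hiN
    have l1 : ((origin.getD i []).take ((origin.getD 0 []).length >>> 1)).length
        = (origin.getD 0 []).length >>> 1 := by rw [List.length_take]; omega
    have l2 : (((origin.getD i []).drop ((origin.getD 0 []).length >>> 1)).take
        ((origin.getD 0 []).length - (origin.getD 0 []).length >>> 1)).length
        = (origin.getD 0 []).length - (origin.getD 0 []).length >>> 1 := by rw [List.length_take, List.length_drop]; omega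
    simp only [pvWs1, List.foldl_cons, List.foldl_nil]
    rw [← pvSliceAsg_eq_stepS _ _ _ ((origin.getD 0 []).length) _ (by rw [l2]; omega),
        ← pvSliceAsg_eq_stepS _ _ _ (2 * ((origin.getD 0 []).length >>> 1)) _
          (by rw [l1]; omega)]
  have e2 : ∀ init : List (List Int),
      (List.range' (origin.length >>> 1) (origin.length - origin.length >>> 1)).foldl
        (fun temp i =>
          let temp := temp.set (i - origin.length >>> 1)
            (pvSliceAsg (temp.getD (i - origin.length >>> 1) []) 0
              ((origin.getD 0 []).length >>> 1)
              ((origin.getD i []).take ((origin.getD 0 []).length >>> 1)))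
          temp.set i (pvSliceAsg (temp.getD i []) 0
            ((origin.getD 0 []).length - (origin.getD 0 []).length >>> 1)
            (((origin.getD i []).drop ((origin.getD 0 []).length >>> 1)).take
              ((origin.getD 0 []).length - (origin.getD 0 []).length >>> 1)))) init =
      (List.range' (origin.length >>> 1) (origin.length - origin.length >>> 1)).foldl
        (fun temp i =>
          (pvWs2 origin (origin.length >>> 1) ((origin.getD 0 []).length >>> 1)
            (origin.getD 0 []).length i).foldl pvStepS temp) init := by
    intro init
    apply PySem.List.foldl_congr_mem
    intro temp i hi
    have hiN : i < origin.length := by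
      have := (List.mem_range'_1.1 hi).2; omega
    have hl := hlen i hiN
    have l1 : ((origin.getD i []).take ((origin.getD 0 []).length >>> 1)).length
        = (origin.getD 0 []).length >>> 1 := by rw [List.length_take]; omega
    have l2 : (((origin.getD i []).drop ((origin.getD 0 []).length >>> 1)).take
        ((origin.getD 0 []).length - (origin.getD 0 []).length >>> 1)).length
        = (origin.getD 0 []).length - (origin.getD 0 []).length >>> 1 := by rw [List.length_take, List.length_drop]; omega
    simp only [pvWs2, List.foldl_cons, List.foldl_nil]
    rw [← pvSliceAsg_eq_stepS _ _ _
          ((origin.getD 0 []).length - (origin.getD 0 []).length >>> 1) _ (by rw [l2]; omega),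
        ← pvSliceAsg_eq_stepS _ _ _ ((origin.getD 0 []).length >>> 1) _ (by rw [l1]; omega)]
  rw [e1, e2]

-- evaluating the last-covering-write fold for one row of B's first loop
theorem pvPair1_eval (o : List (List Int)) (midN midM M t c i : Nat) (hc : c < M)
    (hM : 2 * midM ≤ M) (hl : M ≤ (o.getD i []).length) (hi : i < midN) (d : Int) :
    (pvWs1 o midN midM M i).foldl (fun acc w =>
        if w.1 = t ∧ w.2.1 ≤ c ∧ c < w.2.1 + w.2.2.length then w.2.2.getD (c - w.2.1) 0
        else acc) d = pvG o midN midM M t c i d := by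
  have l1 : ((o.getD i []).take midM).length = midM := by rw [List.length_take]; omega
  have l2 : (((o.getD i []).drop midM).take (M - midM)).length = M - midM := by
    rw [List.length_take, List.length_drop]; omega
  simp only [pvWs1, List.foldl_cons, List.foldl_nil, l1, l2]
  unfold pvG
  rw [if_pos hi]
  by_cases hB : i + midN = t ∧ midM ≤ c ∧ c < midM + (M - midM)
  · rw [if_pos hB, if_neg (show ¬ (t = i ∧ midM ≤ c ∧ c < 2 * midM) from by omega),
        if_pos (show t = i + midN ∧ midM ≤ c from by omega),
        pv_getD_dropTake _ _ _ _ (by omega)]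
    congr 1
    omega
  · rw [if_neg hB]
    by_cases hA : i = t ∧ midM ≤ c ∧ c < midM + midM
    · rw [if_pos hA, if_pos (show t = i ∧ midM ≤ c ∧ c < 2 * midM from by omega),
          pv_getD_take _ _ _ (by omega)]
    · rw [if_neg hA, if_neg (show ¬ (t = i ∧ midM ≤ c ∧ c < 2 * midM) from by omega),
          if_neg (show ¬ (t = i + midN ∧ midM ≤ c) from by omega)]

-- evaluating the last-covering-write fold for one row of B's second loop
theorem pvPair2_eval (o : List (List Int)) (midN midM M t c i : Nat) (_hc : c < M)
    (hM : 2 * midM ≤ M) (hl : M ≤ (o.getD i []).length) (hi : midN ≤ i) (d : Int) :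
    (pvWs2 o midN midM M i).foldl (fun acc w =>
        if w.1 = t ∧ w.2.1 ≤ c ∧ c < w.2.1 + w.2.2.length then w.2.2.getD (c - w.2.1) 0
        else acc) d = pvG o midN midM M t c i d := by
  have l1 : ((o.getD i []).take midM).length = midM := by rw [List.length_take]; omega
  have l2 : (((o.getD i []).drop midM).take (M - midM)).length = M - midM := by
    rw [List.length_take, List.length_drop]; omega
  simp only [pvWs2, List.foldl_cons, List.foldl_nil, l1, l2]
  unfold pvG
  rw [if_neg (show ¬ i < midN from by omega)]
  by_cases hB : i = t ∧ 0 ≤ c ∧ c < 0 + (M - midM)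
  · rw [if_pos hB, if_pos (show t = i ∧ c + midM < M from by omega),
        pv_getD_dropTake _ _ _ _ (by omega)]
    congr 1
    omega
  · rw [if_neg hB]
    by_cases hA : i - midN = t ∧ 0 ≤ c ∧ c < 0 + midM
    · rw [if_pos hA, if_neg (show ¬ (t = i ∧ c + midM < M) from by omega),
          if_pos (show t = i - midN ∧ c < midM from by omega),
          pv_getD_take _ _ _ (by omega), Nat.sub_zero]
    · rw [if_neg hA, if_neg (show ¬ (t = i ∧ c + midM < M) from by omega),
          if_neg (show ¬ (t = i - midN ∧ c < midM) from by omega)]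

-- the per-cell characterisation of B's result: the same fold of pvG over all source rows
theorem calc5_alt_getD (origin : List (List Int)) (hpre : Pre_calc5 origin) (t c : Nat)
    (ht : t < origin.length) (hc : c < (origin.getD 0 []).length) :
    ((calc5_alt origin).getD t []).getD c 0 =
      (List.range origin.length).foldl
        (fun d i => pvG origin (origin.length >>> 1) ((origin.getD 0 []).length >>> 1)
          (origin.getD 0 []).length t c i d) 0 := by
  have hlen : ∀ i, i < origin.length →
      (origin.getD 0 []).length ≤ (origin.getD i []).length := by
    intro i hi
    rw [List.getD_eq_getElem _ _ hi]
    exact hpre.2 _ (List.getElem_mem hi)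
  have hN2 : origin.length >>> 1 = origin.length / 2 := Nat.shiftRight_one _
  have hM2 : (origin.getD 0 []).length >>> 1 = (origin.getD 0 []).length / 2 :=
    Nat.shiftRight_one _
  rw [calc5_alt_eq_flat origin hpre,
      foldl_pvStepS_getD (origin.getD 0 []).length t c _
        (pvWsOk _ _ _ _ (by omega) _ _) _ (pv_init_rows _ _)
        (by rw [List.length_map, List.length_range]; exact ht),
      pv_init_getD _ _ _ _ ht,
      List.foldl_append, ← foldl_foldl_flat, ← foldl_foldl_flat]
  have e1 : (List.range (origin.length >>> 1)).foldl
      (fun d i => (pvWs1 origin (origin.length >>> 1) ((origin.getD 0 []).length >>> 1)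
          (origin.getD 0 []).length i).foldl (fun acc w =>
          if w.1 = t ∧ w.2.1 ≤ c ∧ c < w.2.1 + w.2.2.length then w.2.2.getD (c - w.2.1) 0
          else acc) d) (0 : Int) =
      (List.range (origin.length >>> 1)).foldl
        (fun d i => pvG origin (origin.length >>> 1) ((origin.getD 0 []).length >>> 1)
          (origin.getD 0 []).length t c i d) 0 := by
    apply PySem.List.foldl_congr_mem
    intro d i hi
    have hi' := List.mem_range.1 hi
    exact pvPair1_eval _ _ _ _ _ _ _ hc (by omega) (hlen i (by omega)) hi' d
  rw [e1]
  have e2 : ∀ d0 : Int, (List.range' (origin.length >>> 1)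
        (origin.length - origin.length >>> 1)).foldl
      (fun d i => (pvWs2 origin (origin.length >>> 1) ((origin.getD 0 []).length >>> 1)
          (origin.getD 0 []).length i).foldl (fun acc w =>
          if w.1 = t ∧ w.2.1 ≤ c ∧ c < w.2.1 + w.2.2.length then w.2.2.getD (c - w.2.1) 0
          else acc) d) d0 =
      (List.range' (origin.length >>> 1) (origin.length - origin.length >>> 1)).foldl
        (fun d i => pvG origin (origin.length >>> 1) ((origin.getD 0 []).length >>> 1)
          (origin.getD 0 []).length t c i d) d0 := by
    intro d0
    apply PySem.List.foldl_congr_mem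
    intro d i hi
    have hi' := List.mem_range'_1.1 hi
    exact pvPair2_eval _ _ _ _ _ _ _ hc (by omega) (hlen i (by omega)) hi'.1 d
  rw [e2]
  rw [show List.range origin.length
        = List.range (origin.length >>> 1)
          ++ List.range' (origin.length >>> 1) (origin.length - origin.length >>> 1) by
      rw [List.range_eq_range', List.range_eq_range']
      have h := @List.range'_append_1 0 (origin.length >>> 1)
        (origin.length - origin.length >>> 1)
      rw [Nat.zero_add] at h
      rw [h, show origin.length >>> 1 + (origin.length - origin.length >>> 1)
        = origin.length from by omega],
    List.foldl_append]

theorem calc5_alt_length (origin : List (List Int)) (hpre : Pre_calc5 origin) :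
    (calc5_alt origin).length = origin.length := by
  rw [calc5_alt_eq_flat origin hpre, foldl_pvStepS_length]
  simp

theorem calc5_alt_rows (origin : List (List Int)) (hpre : Pre_calc5 origin) :
    ∀ r ∈ calc5_alt origin, r.length = (origin.getD 0 []).length := by
  have hM2 : (origin.getD 0 []).length >>> 1 = (origin.getD 0 []).length / 2 :=
    Nat.shiftRight_one _
  rw [calc5_alt_eq_flat origin hpre]
  exact foldl_pvStepS_rows _ _ (pvWsOk _ _ _ _ (by omega) _ _) _ (pv_init_rows _ _)

-- ===== VERDICT (by name: the statement is the Claim_ definition above) =====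
theorem calc5_spec : Claim_equal_calc5 := by
  intro origin _ hpre
  unfold Spec_calc5
  apply List.ext_getElem
  · rw [calc5_length, calc5_alt_length origin hpre]
  intro t ht1 ht2
  have htN : t < origin.length := by rwa [calc5_length] at ht1
  apply List.ext_getElem
  · rw [calc5_rows _ _ (List.getElem_mem ht1),
        calc5_alt_rows origin hpre _ (List.getElem_mem ht2)]
  intro c hc1 hc2
  have hcM : c < (origin.getD 0 []).length := by
    rwa [calc5_rows _ _ (List.getElem_mem ht1)] at hc1
  calc (calc5 origin)[t][c]
      = ((calc5 origin).getD t []).getD c 0 := by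
        rw [List.getD_eq_getElem (calc5 origin) [] ht1, List.getD_eq_getElem _ 0 hc1]
    _ = ((calc5_alt origin).getD t []).getD c 0 := by
        rw [calc5_getD origin t c htN hcM, calc5_alt_getD origin hpre t c htN hcM]
    _ = (calc5_alt origin)[t][c] := by
        rw [List.getD_eq_getElem (calc5_alt origin) [] ht2, List.getD_eq_getElem _ 0 hc2]
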